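-- pv_equiv track=rewrite | github.com/genvalen/advent-of-code | advent-of-code-2020/day-9/solution.py | part_one
-- ===== SOURCE A (Python) =====
-- from typing import List
-- from collections import deque
--
-- def part_one(data: List[int]) -> int:
--     """Returns the first element in `data` which does not have a pair of numbers
--     among the previous 25 elements before it that add up to itself.
--     """
--     options = deque(data[:25], maxlen=25)
--
--     for i in range(25, len(data)):
--         candidate = data[i]
--
--         if not has_two_sum(list(options), candidate):
--             return candidate
--
--         options.append(candidate)
--
--     return -1
--
-- def has_two_sum(data: List[int], total: int) -> bool:
--     """Returns True if `data` contains a pair of numbers that add to `total`,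
--     else, returns False.
--     """
--     seen = dict()
--
--     for num in sorted(data):
--         target = total - num
--
--         if target in seen:
--             return True
--
--         seen[num] = num
--
--     return False
-- ===== SOURCE B (Python) =====
-- from typing import List
--
-- def part_one(data: List[int]) -> int:
--     """Returns the first element in `data` which does not have a pair of numbers
--     among the previous 25 elements before it that add up to itself.
--     """
--     for i in range(25, len(data)):
--         window = data[i - 25:i]
--         candidate = data[i]
--         found = False
--         for a in range(len(window)):
--             for b in range(a + 1, len(window)):
--                 if window[a] + window[b] == candidate:
--                     found = True
--         if not found:
--             return candidate
--     return -1
-- ===== Notes on version B (the rewrite author's own statement) =====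
-- stated objective: simpler
-- what changed: Replaced the deque-plus-sorted-dict two-sum helper with an inline brute-force scan over all index pairs of the explicit 25-element slice data[i-25:i], keeping the distinct-position rule and the -1 fallthrough.
import Mathlib
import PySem

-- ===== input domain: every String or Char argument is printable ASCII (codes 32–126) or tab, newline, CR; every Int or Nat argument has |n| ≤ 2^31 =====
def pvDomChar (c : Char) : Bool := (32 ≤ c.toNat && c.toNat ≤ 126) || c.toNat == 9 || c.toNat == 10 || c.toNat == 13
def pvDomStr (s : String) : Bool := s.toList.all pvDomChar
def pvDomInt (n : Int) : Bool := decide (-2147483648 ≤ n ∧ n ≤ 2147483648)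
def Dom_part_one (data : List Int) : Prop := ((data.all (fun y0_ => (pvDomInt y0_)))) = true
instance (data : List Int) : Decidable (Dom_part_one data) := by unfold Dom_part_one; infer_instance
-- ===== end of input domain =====

-- B replaces A's sliding deque + sorted/dict two-sum helper by an inline brute-force
-- scan over all index pairs of the slice data[i-25:i] (objective: simpler).

-- ===== PORT A =====
-- has_two_sum: for num in sorted(data): if total-num in seen: return True; seen[num]=num
def has_two_sum_go (total : Int) : List Int → PySem.Dict Int Int → Bool
  | [], _ => false
  | num :: rest, seen =>
    if seen.contains (total - num) then true
    else has_two_sum_go total rest (seen.insert num num)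

def has_two_sum (data : List Int) (total : Int) : Bool :=
  has_two_sum_go total (PySem.List.sorted data (fun x => x) false) PySem.Dict.empty

-- deque(..., maxlen=25).append: drops the leftmost element when full
def deque_append25 (opts : List Int) (x : Int) : List Int :=
  if opts.length == 25 then opts.tail ++ [x] else opts ++ [x]

-- the for-loop over the candidates data[25:], carrying the deque `options`
def part_one_go : List Int → List Int → Int
  | [], _ => -1
  | candidate :: rest, options =>
    if !has_two_sum options candidate then candidate
    else part_one_go rest (deque_append25 options candidate)

def part_one (data : List Int) : Int :=
  part_one_go (data.drop 25) (data.take 25)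

-- ===== PORT B =====
-- nested index loops: does any pair (a, b), a < b, in the window sum to candidate?
def pair_scan (window : List Int) (candidate : Int) : Bool :=
  (List.range window.length).any fun a =>
    (List.range' (a + 1) (window.length - (a + 1))).any fun b =>
      window.getD a 0 + window.getD b 0 == candidate

-- loop over the indices i in range(25, len(data)); window = data[i-25:i]
def alt_go (data : List Int) : List Nat → Int
  | [] => -1
  | i :: rest =>
    let window := (data.drop (i - 25)).take 25
    let candidate := data.getD i 0
    if !pair_scan window candidate then candidate
    else alt_go data rest

def part_one_alt (data : List Int) : Int :=
  alt_go data (List.range' 25 (data.length - 25))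

-- ===== PRECONDITION & SPEC =====
def Spec_part_one (data : List Int) (out : Int) : Prop := out = part_one_alt data
instance (data : List Int) (out : Int) : Decidable (Spec_part_one data out) := by unfold Spec_part_one; infer_instance

-- ===== CLAIM (what is proved, stated in full; the proofs are below) =====
def Claim_equal_part_one : Prop := ∀ (data : List Int), Dom_part_one data → Spec_part_one data (part_one data)

-- ===== LEMMAS AND PROOFS =====

-- a pair of distinct positions of w summing to c
def GoodPair (w : List Int) (c : Int) : Prop :=
  ∃ a b, a < b ∧ ∃ hb : b < w.length, ∃ ha : a < w.length, w[a] + w[b] = c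

lemma pair_scan_iff (w : List Int) (c : Int) :
    pair_scan w c = true ↔ GoodPair w c := by
  simp only [pair_scan, List.any_eq_true, List.mem_range, List.mem_range'_1, beq_iff_eq]
  constructor
  · rintro ⟨a, ha, b, ⟨hab, hb⟩, heq⟩
    have hb' : b < w.length := by omega
    have ha' : a < w.length := by omega
    refine ⟨a, b, by omega, hb', ha', ?_⟩
    rwa [List.getD_eq_getElem w 0 ha', List.getD_eq_getElem w 0 hb'] at heq
  · rintro ⟨a, b, hab, hb, ha, heq⟩
    refine ⟨a, ha, b, ⟨by omega, by omega⟩, ?_⟩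
    rwa [List.getD_eq_getElem w 0 ha, List.getD_eq_getElem w 0 hb]

lemma perm_pair (x y : Int) (l : List Int) (h : l.Perm [x, y]) : l = [x, y] ∨ l = [y, x] := by
  have := h.length_eq
  match l, this with
  | [p, q], _ =>
    have hp : p ∈ [x, y] := h.mem_iff.mp (by simp)
    simp at hp
    rcases hp with rfl | rfl
    · have h2 : [q].Perm [y] := h.cons_inv
      rw [List.perm_singleton] at h2; simp at h2; subst h2; left; rfl
    · have h2 : [q].Perm [x] := (h.trans (List.Perm.swap p x [])).cons_inv
      rw [List.perm_singleton] at h2; simp at h2; subst h2; right; rfl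

lemma pair_sublist_pos (x y : Int) : ∀ (w : List Int), List.Sublist [x, y] w →
    ∃ a b, a < b ∧ ∃ hb : b < w.length, ∃ ha : a < w.length, w[a] = x ∧ w[b] = y := by
  intro w h
  induction w with
  | nil => simp at h
  | cons z w ih =>
    cases h with
    | cons _ h' =>
      obtain ⟨a, b, hab, hb, ha, hx, hy⟩ := ih h'
      exact ⟨a+1, b+1, by omega, by simpa using Nat.succ_lt_succ hb,
        by simpa using Nat.succ_lt_succ ha, by simpa using hx, by simpa using hy⟩
    | cons₂ _ h' =>
      have hy : y ∈ w := List.singleton_sublist.mp h'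
      obtain ⟨b, hb, hyb⟩ := List.mem_iff_getElem.mp hy
      exact ⟨0, b+1, by omega, by simpa using Nat.succ_lt_succ hb, by simp, by simp,
        by simpa using hyb⟩

lemma pos_pair_sublist (w : List Int) (a b : Nat) (hab : a < b) (hb : b < w.length) :
    List.Sublist [w[a], w[b]] w := by
  have ha : a < w.length := lt_trans hab hb
  have h1 : List.Sublist (w[a] :: w.drop (a+1)) w := by
    rw [← List.drop_eq_getElem_cons ha]; exact List.drop_sublist a w
  apply List.Sublist.trans _ h1
  apply List.Sublist.cons₂
  rw [List.singleton_sublist]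
  refine List.mem_iff_getElem.mpr ⟨b - (a+1), by simp; omega, ?_⟩
  rw [List.getElem_drop]
  congr 1; omega

lemma goodPair_iff_subperm (w : List Int) (c : Int) :
    GoodPair w c ↔ ∃ x y, x + y = c ∧ List.Subperm [x, y] w := by
  constructor
  · rintro ⟨a, b, hab, hb, ha, heq⟩
    exact ⟨w[a], w[b], heq, (pos_pair_sublist w a b hab hb).subperm⟩
  · rintro ⟨x, y, heq, hsp⟩
    obtain ⟨l, hperm, hsub⟩ := hsp
    rcases perm_pair x y l hperm with rfl | rfl
    · obtain ⟨a, b, hab, hb, ha, hx, hy⟩ := pair_sublist_pos x y w hsub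
      exact ⟨a, b, hab, hb, ha, by rw [hx, hy]; exact heq⟩
    · obtain ⟨a, b, hab, hb, ha, hx, hy⟩ := pair_sublist_pos y x w hsub
      exact ⟨a, b, hab, hb, ha, by rw [hx, hy]; omega⟩

lemma goodPair_perm {w w' : List Int} (h : w.Perm w') (c : Int) :
    GoodPair w c ↔ GoodPair w' c := by
  rw [goodPair_iff_subperm, goodPair_iff_subperm]
  constructor
  · rintro ⟨x, y, heq, hsp⟩; exact ⟨x, y, heq, (List.Perm.subperm_left h).mp hsp⟩
  · rintro ⟨x, y, heq, hsp⟩; exact ⟨x, y, heq, (List.Perm.subperm_left h).mpr hsp⟩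

lemma hts_go_iff (c : Int) :
    ∀ (l : List Int) (seen : PySem.Dict Int Int),
      has_two_sum_go c l seen = true ↔
        ∃ j, ∃ hj : j < l.length,
          seen.contains (c - l[j]) = true ∨ ∃ k, ∃ hk : k < j, l[k] = c - l[j] := by
  intro l
  induction l with
  | nil => intro seen; simp [has_two_sum_go]
  | cons n rest ih =>
    intro seen
    simp only [has_two_sum_go]
    by_cases h : seen.contains (c - n) = true
    · rw [if_pos h]
      constructor
      · intro _; exact ⟨0, by simp, Or.inl (by simpa using h)⟩
      · intro _; rfl
    · rw [if_neg h, ih]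
      constructor
      · rintro ⟨j, hj, hcase⟩
        refine ⟨j+1, by simpa using Nat.succ_lt_succ hj, ?_⟩
        rcases hcase with hc | ⟨k, hk, hkeq⟩
        · rw [PySem.Dict.contains_insert] at hc
          simp at hc
          rcases hc with hc | hc
          · right; exact ⟨0, by omega, by simpa using hc.symm⟩
          · left; simpa using hc
        · right; exact ⟨k+1, by omega, by simpa using hkeq⟩
      · rintro ⟨j, hj, hcase⟩
        cases j with
        | zero =>
          simp only [List.getElem_cons_zero] at hcase
          rcases hcase with hc | ⟨k, hk, _⟩
          · exact absurd hc h
          · omega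
        | succ j =>
          have hj' : j < rest.length := by simpa using hj
          refine ⟨j, hj', ?_⟩
          rcases hcase with hc | ⟨k, hk, hkeq⟩
          · left; rw [PySem.Dict.contains_insert]; simp at hc ⊢; right; simpa using hc
          · cases k with
            | zero =>
              left; rw [PySem.Dict.contains_insert]; simp at hkeq ⊢; left
              simpa using hkeq.symm
            | succ k =>
              right; exact ⟨k, by omega, by simpa using hkeq⟩

lemma has_two_sum_eq_pair_scan (w : List Int) (c : Int) :
    has_two_sum w c = pair_scan w c := by
  rw [Bool.eq_iff_iff, pair_scan_iff]
  unfold has_two_sum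
  rw [hts_go_iff]
  rw [← goodPair_perm (PySem.List.sorted_perm w (fun x => x) false) c]
  constructor
  · rintro ⟨j, hj, hc | ⟨k, hk, hkeq⟩⟩
    · rw [PySem.Dict.contains_empty] at hc; exact absurd hc (by simp)
    · exact ⟨k, j, hk, hj, by omega, by omega⟩
  · rintro ⟨a, b, hab, hb, ha, heq⟩
    exact ⟨b, hb, Or.inr ⟨a, hab, by omega⟩⟩

lemma window_shift (data : List Int) (i : Nat) (h25 : 25 ≤ i) (hi : i < data.length) :
    deque_append25 ((data.drop (i - 25)).take 25) data[i] = (data.drop (i + 1 - 25)).take 25 := by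
  have hlen : ((data.drop (i - 25)).take 25).length = 25 := by simp; omega
  have hlen' : ((data.drop (i + 1 - 25)).take 25).length = 25 := by simp; omega
  unfold deque_append25
  rw [if_pos (by simp [hlen])]
  apply List.ext_getElem
  · simp; omega
  · intro k hk1 hk2
    simp only [List.length_append, List.length_tail, hlen, List.length_singleton] at hk1
    by_cases hk : k < 24
    · rw [List.getElem_append_left (by simp [hlen]; omega)]
      rw [List.getElem_tail]
      rw [List.getElem_take, List.getElem_drop, List.getElem_take, List.getElem_drop]
      congr 1; omega
    · have : k = 24 := by omega
      subst this
      rw [List.getElem_append_right (by simp [hlen])]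
      simp only [List.length_tail, hlen]
      rw [List.getElem_singleton, List.getElem_take, List.getElem_drop]
      congr 1; omega

lemma loop_eq (data : List Int) :
    ∀ n i, 25 ≤ i → n = data.length - i →
      part_one_go (data.drop i) ((data.drop (i - 25)).take 25) = alt_go data (List.range' i n) := by
  intro n
  induction n with
  | zero =>
    intro i h25 hn
    have hle : data.length ≤ i := by omega
    rw [List.drop_eq_nil_of_le hle]
    simp [part_one_go, alt_go]
  | succ n ih =>
    intro i h25 hn
    have hi : i < data.length := by omega
    rw [List.drop_eq_getElem_cons hi, List.range'_succ]
    simp only [part_one_go, alt_go]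
    rw [has_two_sum_eq_pair_scan, List.getD_eq_getElem data 0 hi]
    by_cases hp : pair_scan ((data.drop (i - 25)).take 25) data[i] = true
    · rw [hp]
      simp only [Bool.not_true, Bool.false_eq_true, if_false]
      rw [window_shift data i h25 hi]
      exact ih (i + 1) (by omega) (by omega)
    · rw [Bool.eq_false_iff.mpr hp]
      simp

-- ===== VERDICT (by name: the statement is the Claim_ definition above) =====
theorem part_one_spec : Claim_equal_part_one := by
  intro data _
  unfold Spec_part_one part_one part_one_alt
  simpa using loop_eq data (data.length - 25) 25 (le_refl 25) rfl
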